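-- pv_equiv track=rewrite | github.com/waldiez/waldiez | waldiez/models/common/method_utils.py | _sort_imports
-- ===== SOURCE A (Python) =====
-- def _sort_imports(imports: list[str]) -> list[str]:
--     """Sort import statements with 'import' statements before 'from' statements.
--
--     Parameters
--     ----------
--     imports : list[str]
--         List of import statements to sort.
--
--     Returns
--     -------
--     list[str]
--         Sorted import statements.
--     """
--     import_statements = sorted(
--         [stmt for stmt in imports if stmt.startswith("import ")]
--     )
--     from_statements = sorted(
--         [stmt for stmt in imports if stmt.startswith("from ")]
--     )
--     return import_statements + from_statements
-- ===== SOURCE B (Python) =====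
-- def _insert_sorted(lst, s):
--     """Insert s into already-sorted lst, after all elements <= s (stable)."""
--     i = 0
--     while i < len(lst) and lst[i] <= s:
--         i += 1
--     return lst[:i] + [s] + lst[i:]
--
--
-- def _sort_imports(imports: list[str]) -> list[str]:
--     """Single online pass: insert each statement into its group's sorted list."""
--     import_statements: list[str] = []
--     from_statements: list[str] = []
--     for stmt in imports:
--         if stmt.startswith("import "):
--             import_statements = _insert_sorted(import_statements, stmt)
--         if stmt.startswith("from "):
--             from_statements = _insert_sorted(from_statements, stmt)
--     return import_statements + from_statements
-- ===== Notes on version B (the rewrite author's own statement) =====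
-- stated objective: alternative
-- what changed: Replaces the two filter-then-library-sort passes and concatenation with one online pass that inserts each statement into its group's already-sorted list (an incremental insertion sort over two accumulators).
import Mathlib
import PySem

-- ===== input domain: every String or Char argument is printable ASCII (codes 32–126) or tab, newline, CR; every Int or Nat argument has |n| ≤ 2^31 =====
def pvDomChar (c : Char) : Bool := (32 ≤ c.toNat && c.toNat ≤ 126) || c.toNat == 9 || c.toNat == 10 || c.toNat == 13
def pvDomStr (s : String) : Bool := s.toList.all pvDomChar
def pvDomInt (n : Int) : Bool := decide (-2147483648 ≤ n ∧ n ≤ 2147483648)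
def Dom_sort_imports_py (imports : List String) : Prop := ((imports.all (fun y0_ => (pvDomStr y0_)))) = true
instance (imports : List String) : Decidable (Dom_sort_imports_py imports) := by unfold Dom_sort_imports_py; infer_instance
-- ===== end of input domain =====

-- B replaces A's two filter-then-sort passes with one online pass inserting each
-- statement into its group's sorted accumulator; same return value, no speed claim.

-- ===== PORT A =====
def sort_imports_py (imports : List String) : List String :=
  let import_statements :=
    PySem.List.sorted (imports.filter (fun stmt => PySem.Str.startswith stmt "import ")) (fun x => x) false
  let from_statements :=
    PySem.List.sorted (imports.filter (fun stmt => PySem.Str.startswith stmt "from ")) (fun x => x) false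
  import_statements ++ from_statements

-- ===== PORT B =====
-- port of Source B's _insert_sorted: scan past elements ≤ s, insert s there
def insertSortedB : List String → String → List String
  | [], s => [s]
  | y :: t, s => if y ≤ s then y :: insertSortedB t s else s :: y :: t

def sort_imports_py_alt (imports : List String) : List String :=
  let st := imports.foldl
    (fun (st : List String × List String) stmt =>
      let st1 := if PySem.Str.startswith stmt "import " then (insertSortedB st.1 stmt, st.2) else st
      if PySem.Str.startswith stmt "from " then (st1.1, insertSortedB st1.2 stmt) else st1)
    ([], [])
  st.1 ++ st.2

-- ===== PRECONDITION & SPEC =====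
def Spec_sort_imports_py (imports : List String) (out : List String) : Prop := out = sort_imports_py_alt imports
instance (imports : List String) (out : List String) : Decidable (Spec_sort_imports_py imports out) := by unfold Spec_sort_imports_py; infer_instance

-- ===== CLAIM (what is proved, stated in full; the proofs are below) =====
def Claim_equal_sort_imports_py : Prop := ∀ (imports : List String), Dom_sort_imports_py imports → Spec_sort_imports_py imports (sort_imports_py imports)

-- ===== LEMMAS AND PROOFS =====

theorem insertSortedB_eq_insertBy (l : List String) (s : String) :
    insertSortedB l s = PySem.List.insertBy (fun a b => decide (a < b)) s l := by
  induction l with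
  | nil => rfl
  | cons y t ih =>
    simp only [insertSortedB, PySem.List.insertBy, ih]
    by_cases h : y ≤ s
    · simp [h, not_lt_of_ge h]
    · simp [h, lt_of_not_ge h]

theorem foldl_pair_split (l : List String) (a b : List String) :
    (l.foldl
      (fun (st : List String × List String) stmt =>
        let st1 := if PySem.Str.startswith stmt "import " then (insertSortedB st.1 stmt, st.2) else st
        if PySem.Str.startswith stmt "from " then (st1.1, insertSortedB st1.2 stmt) else st1)
      (a, b)) =
    ((l.filter (fun stmt => PySem.Str.startswith stmt "import ")).foldl (fun acc x => insertSortedB acc x) a,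
     (l.filter (fun stmt => PySem.Str.startswith stmt "from ")).foldl (fun acc x => insertSortedB acc x) b) := by
  induction l generalizing a b with
  | nil => rfl
  | cons x t ih =>
    simp only [List.foldl_cons, List.filter_cons]
    cases hi : PySem.Str.startswith x "import " <;>
      cases hf : PySem.Str.startswith x "from " <;>
        simp only [hi, hf, Bool.false_eq_true, if_true, if_false, ite_true, ite_false] <;>
          apply ih

theorem sorted_eq_foldl_insB (xs : List String) :
    PySem.List.sorted xs (fun x => x) false = xs.foldl (fun acc x => insertSortedB acc x) [] := by
  rw [PySem.List.sorted_eq_foldl_insertBy]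
  induction xs using List.reverseRecOn with
  | nil => rfl
  | append_singleton t x ih => simp [List.foldl_append, ih, insertSortedB_eq_insertBy]

-- ===== VERDICT (by name: the statement is the Claim_ definition above) =====
theorem sort_imports_py_spec : Claim_equal_sort_imports_py := by
  intro imports _
  unfold Spec_sort_imports_py sort_imports_py sort_imports_py_alt
  rw [foldl_pair_split, sorted_eq_foldl_insB, sorted_eq_foldl_insB]
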